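-- pv_equiv track=rewrite | github.com/islaarshad/PythonPractice | alienLanguage.py | inChecker
-- ===== SOURCE A (Python) =====
-- def inChecker(target, sourceWord):
--     i = 0
--     j = 0
--     #Declaring the lenght of the target word
--     targetLength = len(target)
--     myCount = 0
--     hasFound = False
--     #Declaring the length of the source word as source indexing later on
--     sourceCounter = len(sourceWord)
--
--     #Go through the source word and check if there is a "(" present
--     while i < len(sourceWord):
--         if sourceWord[i] != "(":
--             #If the word at the index is within the target and source word, increment the count
--             if myCount < len(target) and target[myCount] == sourceWord[i]:
--                 myCount = myCount + 1
--             #Keep in track of the seperate count to see if "(" was present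
--             j = j + 1
--         #If "(" was not present at all
--         else:
--             sourceCounter = sourceCounter - 1
--             j = j + 1
--             #Check if the ")" was present
--             while sourceWord[j] != ")":
--                 sourceCounter = sourceCounter - 1
--                 #Check to see that if the target word is not found if the index of the target word and source word is the same
--                 if myCount < len(target) and hasFound == False and target[myCount] == sourceWord[j]:
--                     myCount = myCount + 1
--                     #The word has been found
--                     hasFound = True
--                 #increment the instance of find ")"
--                 j = j + 1
--             #Once outside of ")", set hasFound to False
--             hasFound = False
--             #increment the instance of find ")"
--             j = j + 1
--         #Critical, make sure that j become i because we want increment i more than once!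
--         i = j
--
--     #Check to see if myCount was the index length of source word and myCount was equal to target length
--     #Better would have been sourceCounter == targetLength, but this works
--     if myCount == sourceCounter and myCount == targetLength:
--         return True
--     return False
-- ===== SOURCE B (Python) =====
-- def inChecker(target, sourceWord):
--     # First pass: tokenize the source word into a list of tokens, where a
--     # parenthesized group becomes the string of its inner characters and any
--     # other character becomes a one-character token.
--     tokens = []
--     rest = sourceWord
--     while rest:
--         if rest[0] == "(":
--             rest = rest[1:]
--             k = rest.index(")")
--             tokens.append(rest[:k])
--             rest = rest[k + 1:]
--         else:
--             tokens.append(rest[0])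
--             rest = rest[1:]
--     # Second pass: match positionally, a token matching iff it contains the
--     # corresponding target character.
--     if len(tokens) != len(target):
--         return False
--     return all(target[i] in tokens[i] for i in range(len(target)))
-- ===== Notes on version B (the rewrite author's own statement) =====
-- stated objective: simpler
-- what changed: Replaces A's single-pass dual-index (i/j) state machine with myCount/sourceCounter/hasFound bookkeeping by a two-pass decomposition: tokenize the source into one-char and parenthesized-group tokens, then compare lengths and match positionally with membership.
import Mathlib
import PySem

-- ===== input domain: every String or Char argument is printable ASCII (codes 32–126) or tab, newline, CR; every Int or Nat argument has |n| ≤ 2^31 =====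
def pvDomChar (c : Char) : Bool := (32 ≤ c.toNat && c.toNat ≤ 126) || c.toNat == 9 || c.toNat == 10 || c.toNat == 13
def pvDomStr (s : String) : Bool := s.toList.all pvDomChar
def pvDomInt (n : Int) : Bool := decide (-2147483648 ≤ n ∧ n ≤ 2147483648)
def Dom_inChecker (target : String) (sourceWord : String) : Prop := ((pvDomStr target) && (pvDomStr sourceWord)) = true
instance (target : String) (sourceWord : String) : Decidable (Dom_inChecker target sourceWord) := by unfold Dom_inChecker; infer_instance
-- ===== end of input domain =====

-- B replaces A's dual-index/sourceCounter state machine by a two-pass decomposition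
-- (tokenize into groups/one-char tokens, then match positionally); objective: simpler.

-- ===== PORT A =====
-- inner while loop of A: walks from index j until ')' ; each step decrements
-- sourceCounter; matches target[myCount] at most once (hasFound).
-- Returns none where Python raises IndexError (unclosed '(').
def pvInnerA (t : List Char) (m : Nat) (hasFound : Bool) (sc : Nat) :
    List Char → Option (Nat × Nat × List Char)
  | [] => none
  | c :: rs =>
    if c = ')' then some (m, sc, rs)
    else if m < t.length ∧ hasFound = false ∧ t[m]? = some c then
      pvInnerA t (m + 1) true (sc - 1) rs
    else
      pvInnerA t m hasFound (sc - 1) rs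

theorem pvInnerA_length_lt (t : List Char) :
    ∀ (rest : List Char) (m : Nat) (hf : Bool) (sc : Nat) (m' sc' : Nat) (after : List Char),
      pvInnerA t m hf sc rest = some (m', sc', after) → after.length < rest.length := by
  intro rest
  induction rest with
  | nil => intro m hf sc m' sc' after h; simp [pvInnerA] at h
  | cons c rs ih =>
    intro m hf sc m' sc' after h
    simp only [pvInnerA] at h
    by_cases hc : c = ')'
    · simp [hc] at h
      obtain ⟨_, _, h3⟩ := h
      simp [← h3, List.length_cons]
    · simp only [hc, if_false] at h
      split at h
      · have := ih _ _ _ _ _ _ h; simp [List.length_cons]; omega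
      · have := ih _ _ _ _ _ _ h; simp [List.length_cons]; omega

-- outer while loop of A over the remaining source; state (myCount, sourceCounter).
def pvLoopA (t : List Char) (m : Nat) (sc : Nat) : List Char → Option (Nat × Nat)
  | [] => some (m, sc)
  | c :: rs =>
    if c ≠ '(' then
      pvLoopA t (if m < t.length ∧ t[m]? = some c then m + 1 else m) sc rs
    else
      match h : pvInnerA t m false (sc - 1) rs with
      | none => none
      | some (m', sc', after) => pvLoopA t m' sc' after
  termination_by rest => rest.length
  decreasing_by
    · simp [List.length_cons]
    · have := pvInnerA_length_lt t rs m false (sc - 1) m' sc' after h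
      simp [List.length_cons]; omega

def inChecker (target : String) (sourceWord : String) : Bool :=
  match pvLoopA target.toList 0 sourceWord.toList.length sourceWord.toList with
  | none => false   -- Python raises IndexError here (excluded by Pre_)
  | some (m, sc) => decide (m = sc ∧ m = target.toList.length)

-- ===== PORT B =====
-- first pass of B: tokenize; '(' grabs the substring up to the first ')'
-- (rest.index(')') = PySem.List.index?; rest[:k] / rest[k+1:] = take/drop,
-- exact for these natural bounds); none where Python raises (unclosed '(').
def pvTokenize : List Char → Option (List (List Char))
  | [] => some []
  | c :: rs =>
    if c = '(' then
      match PySem.List.index? rs ')' with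
      | none => none
      | some k => (pvTokenize (rs.drop (k + 1))).map (fun ts => rs.take k :: ts)
    else
      (pvTokenize rs).map (fun ts => [c] :: ts)
  termination_by rest => rest.length
  decreasing_by
    all_goals simp only [List.length_cons, List.length_drop]; omega

def inChecker_alt (target : String) (sourceWord : String) : Bool :=
  match pvTokenize sourceWord.toList with
  | none => false   -- Python raises ValueError here (excluded by Pre_)
  | some tokens =>
    if tokens.length ≠ target.toList.length then false
    else
      (List.range target.toList.length).all
        (fun i => (tokens.getD i []).contains (target.toList.getD i ' '))

-- ===== PRECONDITION & SPEC =====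
-- Pre_ excludes exactly the sources with an unclosed '(' (a '(' after the last ')'),
-- on which both Pythons raise (A IndexError, B ValueError).
def Pre_inChecker (target : String) (sourceWord : String) : Prop :=
  '(' ∉ sourceWord.toList.reverse.takeWhile (fun c => c ≠ ')')
instance (target : String) (sourceWord : String) : Decidable (Pre_inChecker target sourceWord) := by
  unfold Pre_inChecker; infer_instance

def pvWitness_inChecker : String × String := ("ab", "a(bc)")

def Spec_inChecker (target : String) (sourceWord : String) (out : Bool) : Prop := out = inChecker_alt target sourceWord
instance (target : String) (sourceWord : String) (out : Bool) : Decidable (Spec_inChecker target sourceWord out) := by unfold Spec_inChecker; infer_instance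

-- ===== CLAIM (what is proved, stated in full; the proofs are below) =====
def Claim_equal_inChecker : Prop := ∀ (target : String) (sourceWord : String), Dom_inChecker target sourceWord → Pre_inChecker target sourceWord → Spec_inChecker target sourceWord (inChecker target sourceWord)

-- ===== LEMMAS AND PROOFS =====

-- one greedy step of A, expressed on a whole token (proof-side helper)
def pvStep (t : List Char) (m : Nat) (tok : List Char) : Nat :=
  match t[m]? with
  | some ch => if tok.contains ch then m + 1 else m
  | none => m

theorem pvInnerA_none (t : List Char) :
    ∀ (rs : List Char) (m : Nat) (hf : Bool) (sc : Nat), ')' ∉ rs →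
      pvInnerA t m hf sc rs = none := by
  intro rs
  induction rs with
  | nil => intro m hf sc _; simp [pvInnerA]
  | cons c rs ih =>
    intro m hf sc hmem
    simp only [List.mem_cons, not_or] at hmem
    simp only [pvInnerA, if_neg (Ne.symm hmem.1)]
    split
    · exact ih _ _ _ hmem.2
    · exact ih _ _ _ hmem.2

theorem pvInnerA_found (t : List Char) :
    ∀ (rs : List Char) (k : Nat) (m : Nat) (sc : Nat),
      PySem.List.index? rs ')' = some k →
      pvInnerA t m true sc rs = some (m, sc - k, rs.drop (k + 1)) := by
  intro rs
  induction rs with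
  | nil => intro k m sc h; simp [PySem.List.index?] at h
  | cons c rs ih =>
    intro k m sc h
    by_cases hc : c = ')'
    · subst hc
      rw [PySem.List.index?_cons_self] at h
      cases h
      simp [pvInnerA]
    · rw [PySem.List.index?_cons_of_ne rs hc] at h
      obtain ⟨k', hk', rfl⟩ := Option.map_eq_some_iff.mp h
      simp only [pvInnerA, if_neg hc]
      rw [if_neg (by simp)]
      rw [ih _ _ _ hk']
      simp only [List.drop_succ_cons, Option.some.injEq, Prod.mk.injEq]
      refine ⟨trivial, by omega, trivial⟩

theorem pvInnerA_some (t : List Char) :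
    ∀ (rs : List Char) (k : Nat) (m : Nat) (sc : Nat),
      PySem.List.index? rs ')' = some k →
      pvInnerA t m false sc rs = some (pvStep t m (rs.take k), sc - k, rs.drop (k + 1)) := by
  intro rs
  induction rs with
  | nil => intro k m sc h; simp [PySem.List.index?] at h
  | cons c rs ih =>
    intro k m sc h
    by_cases hc : c = ')'
    · subst hc
      rw [PySem.List.index?_cons_self] at h
      cases h
      simp [pvInnerA, pvStep]
      cases t[m]? <;> simp
    · rw [PySem.List.index?_cons_of_ne rs hc] at h
      obtain ⟨k', hk', rfl⟩ := Option.map_eq_some_iff.mp h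
      simp only [pvInnerA, if_neg hc]
      by_cases hm : m < t.length ∧ t[m]? = some c
      · rw [if_pos ⟨hm.1, trivial, hm.2⟩]
        rw [pvInnerA_found t rs k' (m + 1) (sc - 1) hk']
        simp only [List.take_succ_cons, List.drop_succ_cons, Option.some.injEq, Prod.mk.injEq]
        refine ⟨by simp [pvStep, hm.2], by omega, trivial⟩
      · rw [if_neg (fun hcon => hm ⟨hcon.1, hcon.2.2⟩)]
        rw [ih _ _ _ hk']
        cases hmt : t[m]? with
        | none =>
          simp only [List.take_succ_cons, List.drop_succ_cons, Option.some.injEq, Prod.mk.injEq]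
          refine ⟨by simp [pvStep, hmt], by omega, trivial⟩
        | some ch =>
          have hmlt : m < t.length := by
            have := List.getElem?_eq_some_iff.mp hmt; exact this.1
          have hne : ch ≠ c := fun he => hm ⟨hmlt, by rw [hmt, he]⟩
          simp only [List.take_succ_cons, List.drop_succ_cons, Option.some.injEq, Prod.mk.injEq]
          refine ⟨by simp [pvStep, hmt, hne], by omega, trivial⟩
theorem pvTokenize_length_le :
    ∀ (rest : List Char) (toks : List (List Char)),
      pvTokenize rest = some toks → toks.length ≤ rest.length := by
  intro rest
  induction rest using pvTokenize.induct with
  | case1 => intro toks h; simp [pvTokenize] at h; simp [← h]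
  | case2 rs hk =>
    intro toks h
    rw [pvTokenize, if_pos rfl, hk] at h
    simp at h
  | case3 rs k hk ih =>
    intro toks h
    rw [pvTokenize] at h
    rw [if_pos rfl, hk] at h
    obtain ⟨ts, hts, rfl⟩ := Option.map_eq_some_iff.mp h
    have := ih ts hts
    have hklt : k < rs.length := by
      obtain ⟨hlt, _, _⟩ := PySem.List.getElem_of_index?_eq_some hk
      exact hlt
    simp only [List.length_cons, List.length_drop] at *
    omega
  | case4 c rs hc ih =>
    intro toks h
    rw [pvTokenize, if_neg hc] at h
    obtain ⟨ts, hts, rfl⟩ := Option.map_eq_some_iff.mp h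
    have := ih ts hts
    simp only [List.length_cons] at *
    omega
theorem pvLoopA_eq_tokenize (t : List Char) :
    ∀ (rest : List Char) (m : Nat) (sc : Nat),
      pvLoopA t m sc rest =
        match pvTokenize rest with
        | none => none
        | some toks => some (toks.foldl (pvStep t) m, sc - (rest.length - toks.length)) := by
  intro rest
  induction rest using pvTokenize.induct with
  | case1 => intro m sc; simp [pvLoopA, pvTokenize]
  | case2 rs hk =>
    intro m sc
    rw [pvLoopA, pvTokenize, if_neg (by simp), if_pos rfl, hk]
    rw [pvInnerA_none t rs m false (sc - 1) ((PySem.List.index?_eq_none_iff rs ')').mp hk)]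
  | case3 rs k hk ih =>
    intro m sc
    rw [pvLoopA, pvTokenize, if_neg (by simp), if_pos rfl, hk]
    rw [pvInnerA_some t rs k m (sc - 1) hk]
    dsimp only
    rw [ih]
    have hklt : k < rs.length := (PySem.List.getElem_of_index?_eq_some hk).1
    cases htk : pvTokenize (rs.drop (k + 1)) with
    | none => simp
    | some ts =>
      have hle := pvTokenize_length_le _ _ htk
      simp only [List.length_drop] at hle
      simp only [Option.map_some, List.foldl_cons, Option.some.injEq, Prod.mk.injEq,
        List.length_cons, List.length_drop]
      refine ⟨trivial, by omega⟩
  | case4 c rs hc ih =>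
    intro m sc
    rw [pvLoopA, if_pos hc, pvTokenize, if_neg hc]
    have hstep : (if m < t.length ∧ t[m]? = some c then m + 1 else m) = pvStep t m [c] := by
      cases hmt : t[m]? with
      | none =>
        rw [if_neg (by simp)]
        simp [pvStep, hmt]
      | some ch =>
        have hmlt : m < t.length := (List.getElem?_eq_some_iff.mp hmt).1
        by_cases he : ch = c
        · subst he
          rw [if_pos ⟨hmlt, rfl⟩]; simp [pvStep, hmt]
        · rw [if_neg (by simp [he])]
          simp [pvStep, hmt, he]
    rw [hstep, ih]
    cases htk : pvTokenize rs with
    | none => simp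
    | some ts =>
      have hle := pvTokenize_length_le _ _ htk
      simp only [Option.map_some, List.foldl_cons, Option.some.injEq, Prod.mk.injEq,
        List.length_cons]
      refine ⟨trivial, by omega⟩
theorem pvFoldl_step_le (t : List Char) :
    ∀ (toks : List (List Char)) (m : Nat),
      toks.foldl (pvStep t) m ≤ m + toks.length := by
  intro toks
  induction toks with
  | nil => intro m; simp
  | cons tok toks ih =>
    intro m
    have h1 : pvStep t m tok ≤ m + 1 := by
      unfold pvStep
      cases t[m]? with
      | none => simp
      | some ch => simp only []; split <;> omega
    have := ih (pvStep t m tok)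
    simp only [List.foldl_cons, List.length_cons]
    omega

theorem pvFoldl_step_full (t : List Char) :
    ∀ (toks : List (List Char)) (m : Nat),
      toks.foldl (pvStep t) m = m + toks.length ↔
        (∀ i < toks.length, m + i < t.length ∧
          (toks.getD i []).contains (t.getD (m + i) ' ') = true) := by
  intro toks
  induction toks with
  | nil => intro m; simp
  | cons tok toks ih =>
    intro m
    simp only [List.foldl_cons, List.length_cons]
    by_cases hmatch : ∃ ch, t[m]? = some ch ∧ tok.contains ch = true
    · obtain ⟨ch, hmt, hcont⟩ := hmatch
      have hmlt : m < t.length := (List.getElem?_eq_some_iff.mp hmt).1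
      have hcont' : ch ∈ tok := by simpa using hcont
      have hch : t.getD m ' ' = ch := by
        rw [List.getD_eq_getElem?_getD, hmt]; rfl
      have hstep : pvStep t m tok = m + 1 := by simp [pvStep, hmt, hcont']
      rw [hstep]
      constructor
      · intro h i hi
        cases i with
        | zero =>
          refine ⟨by omega, ?_⟩
          simp only [Nat.add_zero, List.getD_cons_zero]
          rw [List.getD_eq_getElem?_getD, hmt]
          simpa using hcont'
        | succ j =>
          have hres := (ih (m + 1)).mp (by omega) j (by omega)
          have harith : m + 1 + j = m + (j + 1) := by omega
          rw [harith] at hres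
          exact ⟨hres.1, by simpa using hres.2⟩
      · intro h
        have : List.foldl (pvStep t) (m + 1) toks = (m + 1) + toks.length := by
          rw [ih]
          intro j hj
          have hres := h (j + 1) (by omega)
          have harith : m + (j + 1) = m + 1 + j := by omega
          rw [harith] at hres
          exact ⟨hres.1, by simpa using hres.2⟩
        omega
    · have hstep : pvStep t m tok = m := by
        unfold pvStep
        cases hmt : t[m]? with
        | none => rfl
        | some ch => exact if_neg (fun hc => hmatch ⟨ch, hmt, hc⟩)
      rw [hstep]
      constructor
      · intro h
        have := pvFoldl_step_le t toks m
        omega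
      · intro h
        exfalso
        have h0 := h 0 (by omega)
        simp only [Nat.add_zero, List.getD_cons_zero] at h0
        apply hmatch
        refine ⟨t.getD m ' ', ?_, h0.2⟩
        rw [List.getD_eq_getElem?_getD, List.getElem?_eq_getElem h0.1]
        rfl
theorem inChecker_eq_alt (target : String) (sourceWord : String) :
    inChecker target sourceWord = inChecker_alt target sourceWord := by
  unfold inChecker inChecker_alt
  rw [pvLoopA_eq_tokenize]
  cases htk : pvTokenize sourceWord.toList with
  | none => rfl
  | some toks =>
    have hle := pvTokenize_length_le _ _ htk
    have hsc : sourceWord.toList.length - (sourceWord.toList.length - toks.length) = toks.length := by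
      omega
    dsimp only
    rw [hsc]
    by_cases hlen : toks.length = target.toList.length
    · rw [if_neg (by omega)]
      have hfull := pvFoldl_step_full target.toList toks 0
      simp only [Nat.zero_add] at hfull
      rw [Bool.eq_iff_iff]
      simp only [decide_eq_true_eq, List.all_eq_true, List.mem_range]
      constructor
      · intro ⟨h1, _⟩ i hi
        exact ((hfull.mp h1) i (by omega)).2
      · intro h
        have : List.foldl (pvStep target.toList) 0 toks = toks.length := by
          rw [hfull]
          intro i hi
          exact ⟨by omega, h i (by omega)⟩
        exact ⟨this, by omega⟩
    · rw [if_pos (by omega)]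
      rw [Bool.eq_iff_iff]
      simp only [decide_eq_true_eq]
      constructor
      · intro ⟨h1, h2⟩; exact absurd (h1 ▸ h2) hlen
      · intro h; exact absurd h (by simp)

-- ===== VERDICT (by name: the statement is the Claim_ definition above) =====
theorem inChecker_spec : Claim_equal_inChecker := by
  intro target sourceWord _ _
  unfold Spec_inChecker
  exact inChecker_eq_alt target sourceWord
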